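-- pv_equiv track=rewrite | github.com/Aasthaengg/IBMdataset | Python_codes/p02585/s812759484.py | circle_maximum
-- ===== SOURCE A (Python) =====
-- def circle_maximum(A,K):
--   max_val=max(A)
--   for i in range(len(A)):
--     val=0
--     for k in range(K):
--       pos=(i+k)%len(A)
--       val+=A[pos]
--       max_val=max(max_val,val)
--   return max_val
-- ===== SOURCE B (Python) =====
-- def circle_maximum(A, K):
--     # Prefix sums on the extended array + block-decomposition sliding-window maximum: O(n+K) vs A's O(n*K).
--     n = len(A)
--     best = max(A)
--     if K <= 0:
--         return best
--     m = n + K - 1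
--     P = [0]
--     for j in range(m):
--         P.append(P[-1] + A[j % n])
--     # window values are Q[t] = P[t+1] for t in 0..m-1; block size K
--     pre = []
--     for t in range(m):
--         x = P[t + 1]
--         pre.append(x if t % K == 0 else max(pre[-1], x))
--     suf_rev = []
--     for t in range(m - 1, -1, -1):
--         x = P[t + 1]
--         if t % K == K - 1 or t == m - 1:
--             suf_rev.append(x)
--         else:
--             suf_rev.append(max(suf_rev[-1], x))
--     suf = suf_rev[::-1]
--     for i in range(n):
--         w = max(suf[i], pre[i + K - 1])
--         best = max(best, w - P[i])
--     return best
-- ===== Notes on version B (the rewrite author's own statement) =====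
-- stated objective: faster
-- what changed: Replaces A's O(n*K) restart-every-start double loop by prefix sums over the extended array plus a block-decomposition sliding-window maximum (per-block prefix/suffix maxima), evaluating each start in O(1).
import Mathlib
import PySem

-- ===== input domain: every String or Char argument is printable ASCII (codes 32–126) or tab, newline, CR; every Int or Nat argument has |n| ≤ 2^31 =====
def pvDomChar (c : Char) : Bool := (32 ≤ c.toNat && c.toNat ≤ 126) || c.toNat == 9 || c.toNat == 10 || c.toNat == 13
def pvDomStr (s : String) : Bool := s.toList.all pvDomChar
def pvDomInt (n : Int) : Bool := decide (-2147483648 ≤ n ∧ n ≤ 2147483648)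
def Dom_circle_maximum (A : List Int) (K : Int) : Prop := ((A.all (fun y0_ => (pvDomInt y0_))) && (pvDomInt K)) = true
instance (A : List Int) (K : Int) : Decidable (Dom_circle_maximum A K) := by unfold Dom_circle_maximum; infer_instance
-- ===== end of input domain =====

-- B replaces A's O(n*K) double loop by prefix sums over the extended array plus a
-- block-decomposition sliding-window maximum (prefix/suffix block maxima), measured faster.


-- ===== PORT A =====
def circle_maximum (A : List Int) (K : Int) : Int :=
  let max_val : Int := (PySem.List.max? A id).getD 0
  (PySem.List.pyRange 0 (PySem.List.len A) 1).foldl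
    (fun mv i =>
      ((PySem.List.pyRange 0 K 1).foldl
        (fun (st : Int × Int) k =>
          let pos := PySem.Int.mod (i + k) (PySem.List.len A)
          let val := st.1 + PySem.List.pyGetD A pos 0
          (val, max st.2 val)) ((0 : Int), mv)).2)
    max_val

-- ===== PORT B =====
def circle_maximum_alt (A : List Int) (K : Int) : Int :=
  let n : Int := PySem.List.len A
  let best : Int := (PySem.List.max? A id).getD 0
  if K ≤ 0 then best
  else
    let m : Int := n + K - 1
    let P : List Int := (PySem.List.pyRange 0 m 1).foldl
      (fun P j => P ++ [PySem.List.pyGetD P (-1) 0 + PySem.List.pyGetD A (PySem.Int.mod j n) 0])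
      [(0 : Int)]
    let pre : List Int := (PySem.List.pyRange 0 m 1).foldl
      (fun pre t =>
        let x := PySem.List.pyGetD P (t + 1) 0
        pre ++ [if PySem.Int.mod t K = 0 then x else max (PySem.List.pyGetD pre (-1) 0) x])
      []
    let sufRev : List Int := (PySem.List.pyRange (m - 1) (-1) (-1)).foldl
      (fun s t =>
        let x := PySem.List.pyGetD P (t + 1) 0
        if PySem.Int.mod t K = K - 1 ∨ t = m - 1 then s ++ [x]
        else s ++ [max (PySem.List.pyGetD s (-1) 0) x])
      []
    let suf : List Int := (PySem.List.slice? sufRev none none (-1)).getD []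
    (PySem.List.pyRange 0 n 1).foldl
      (fun best i =>
        let w := max (PySem.List.pyGetD suf i 0) (PySem.List.pyGetD pre (i + K - 1) 0)
        max best (w - PySem.List.pyGetD P i 0))
      best

-- ===== PRECONDITION & SPEC =====
-- Pre_ excludes only the empty list, on which Python's max(A) raises ValueError (in both A and B).
def Pre_circle_maximum (A : List Int) (K : Int) : Prop := A ≠ []
instance (A : List Int) (K : Int) : Decidable (Pre_circle_maximum A K) := by unfold Pre_circle_maximum; infer_instance
def pvWitness_circle_maximum : List Int × Int := ([1, -2, 3], 2)

def Spec_circle_maximum (A : List Int) (K : Int) (out : Int) : Prop := out = circle_maximum_alt A K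
instance (A : List Int) (K : Int) (out : Int) : Decidable (Spec_circle_maximum A K out) := by unfold Spec_circle_maximum; infer_instance

-- ===== CLAIM (what is proved, stated in full; the proofs are below) =====
def Claim_equal_circle_maximum : Prop := ∀ (A : List Int) (K : Int), Dom_circle_maximum A K → Pre_circle_maximum A K → Spec_circle_maximum A K (circle_maximum A K)

-- ===== LEMMAS AND PROOFS =====

-- extended array element, prefix sums, window maxima (proof-side abstractions)
def Ef (A : List Int) (j : ℕ) : Int := A.getD (j % A.length) 0

def Pf (A : List Int) : ℕ → Int
  | 0 => 0
  | t+1 => Pf A t + Ef A t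

def Qf (A : List Int) (t : ℕ) : Int := Pf A (t+1)

-- max of Qf over the index interval [a, a+l]
def qQ (A : List Int) (a : ℕ) : ℕ → Int
  | 0 => Qf A a
  | l+1 => max (qQ A a l) (Qf A (a+l+1))

def preF (A : List Int) (k : ℕ) : ℕ → Int
  | 0 => Qf A 0
  | t+1 => if (t+1) % k = 0 then Qf A (t+1) else max (preF A k t) (Qf A (t+1))

def sufF (A : List Int) (k m t : ℕ) : Int :=
  if t % k = k - 1 ∨ m - 1 ≤ t then Qf A t
  else max (sufF A k m (t+1)) (Qf A t)
termination_by m - t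
decreasing_by omega

lemma modSucc {k : ℕ} (hk : 0 < k) (t : ℕ) :
    ((t+1) % k = 0 ∧ t % k = k - 1) ∨ ((t+1) % k = t % k + 1 ∧ t % k + 1 < k) := by
  have h1 : (t+1) % k = (t % k + 1) % k := (Nat.mod_add_mod t k 1).symm
  have h2 : t % k < k := Nat.mod_lt _ hk
  by_cases h : t % k + 1 = k
  · left; rw [h1, h, Nat.mod_self]; omega
  · right; rw [h1, Nat.mod_eq_of_lt (by omega)]; omega

lemma modWinEnd {k : ℕ} (hk : 0 < k) (i : ℕ) :
    (i + k - 1) % k = (i % k + k - 1) % k := by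
  have hd := Nat.div_add_mod i k
  have h3 : i + k - 1 = k * (i / k) + (i % k + k - 1) := by omega
  rw [h3, Nat.mul_add_mod]

lemma qQ_cons (A : List Int) (a l : ℕ) :
    qQ A a (l+1) = max (Qf A a) (qQ A (a+1) l) := by
  induction l with
  | zero => simp [qQ]
  | succ l ih =>
    have e : a + (l + 1) + 1 = a + 1 + l + 1 := by omega
    calc qQ A a (l+1+1) = max (qQ A a (l+1)) (Qf A (a+(l+1)+1)) := rfl
      _ = max (max (Qf A a) (qQ A (a+1) l)) (Qf A (a+1+l+1)) := by rw [ih, e]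
      _ = max (Qf A a) (max (qQ A (a+1) l) (Qf A (a+1+l+1))) := max_assoc _ _ _
      _ = max (Qf A a) (qQ A (a+1) (l+1)) := rfl

lemma qQ_split (A : List Int) (a l1 l2 : ℕ) :
    qQ A a (l1 + l2 + 1) = max (qQ A a l1) (qQ A (a + l1 + 1) l2) := by
  induction l2 with
  | zero => rfl
  | succ l ih =>
    have e : a + (l1 + l + 1) + 1 = (a + l1 + 1) + l + 1 := by omega
    calc qQ A a (l1+(l+1)+1) = qQ A a ((l1+l+1)+1) := by
          rw [show l1+(l+1)+1 = (l1+l+1)+1 from by omega]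
      _ = max (qQ A a (l1+l+1)) (Qf A (a+(l1+l+1)+1)) := rfl
      _ = max (max (qQ A a l1) (qQ A (a+l1+1) l)) (Qf A ((a+l1+1)+l+1)) := by rw [ih, e]
      _ = max (qQ A a l1) (qQ A (a+l1+1) (l+1)) := max_assoc _ _ _

lemma preF_eq (A : List Int) {k : ℕ} (hk : 0 < k) (t : ℕ) :
    preF A k t = qQ A (t - t % k) (t % k) := by
  induction t with
  | zero => simp [preF, qQ]
  | succ t ih =>
    rcases modSucc hk t with ⟨h0, _⟩ | ⟨h1, h2⟩
    · simp [preF, h0, qQ]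
    · have hne : (t+1) % k ≠ 0 := by omega
      have hle : t % k ≤ t := Nat.mod_le _ _
      rw [show preF A k (t+1) = if (t+1) % k = 0 then Qf A (t+1) else max (preF A k t) (Qf A (t+1)) from rfl]
      rw [if_neg hne, ih, h1]
      rw [show t + 1 - (t % k + 1) = t - t % k from by omega]
      rw [show qQ A (t - t % k) (t % k + 1) = max (qQ A (t - t % k) (t % k)) (Qf A ((t - t % k) + t % k + 1)) from rfl]
      congr 2
      omega

lemma sufF_eq (A : List Int) {k m : ℕ} (hk : 0 < k) (t : ℕ) (ht : t ≤ m - 1) :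
    sufF A k m t = qQ A t (min (t - t % k + (k - 1)) (m - 1) - t) := by
  have hmod : t % k < k := Nat.mod_lt _ hk
  have hle : t % k ≤ t := Nat.mod_le _ _
  by_cases hc : t % k = k - 1 ∨ m - 1 ≤ t
  · rw [sufF, if_pos hc]
    rcases hc with hc | hc
    · rw [show min (t - t % k + (k - 1)) (m - 1) = t from by omega]
      simp [qQ]
    · rw [show min (t - t % k + (k - 1)) (m - 1) = t from by omega]
      simp [qQ]
  · rw [not_or] at hc
    obtain ⟨hc1, hc2a⟩ := hc
    have hc2 : t < m - 1 := by omega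
    have ht1 : t + 1 ≤ m - 1 := by omega
    have ih := sufF_eq A hk (t+1) ht1
    rw [sufF, if_neg (by rw [not_or]; exact ⟨hc1, by omega⟩), ih]
    have hmod1 : (t+1) % k = t % k + 1 := by
      rcases modSucc hk t with ⟨_, h⟩ | ⟨h, _⟩ <;> omega
    rw [hmod1]
    have hb : t + 1 - (t % k + 1) = t - t % k := by omega
    rw [hb]
    set b := min (t - t % k + (k - 1)) (m - 1) with hbdef
    have hbt : t < b := by omega
    have : b - (t + 1) + 1 = b - t := by omega
    rw [max_comm, ← this, qQ_cons]
termination_by m - t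
decreasing_by omega

lemma window_eq (A : List Int) {k n : ℕ} (hk : 0 < k) (i : ℕ) (hi : i < n) :
    max (sufF A k (n + k - 1) i) (preF A k (i + k - 1)) = qQ A i (k - 1) := by
  have hm : 0 < n + k - 1 := by omega
  have hsuf := sufF_eq A (m := n + k - 1) hk i (by omega)
  have hpre := preF_eq A hk (i + k - 1)
  have hmodi : i % k < k := Nat.mod_lt _ hk
  have hlei : i % k ≤ i := Nat.mod_le _ _
  have hwe := modWinEnd hk i
  by_cases hr : i % k = 0
  · have h1 : (i + k - 1) % k = k - 1 := by
      rw [hwe, hr, show 0 + k - 1 = k - 1 from by omega]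
      exact Nat.mod_eq_of_lt (by omega)
    rw [hsuf, hpre, h1, hr]
    rw [show min (i - 0 + (k - 1)) (n + k - 1 - 1) - i = k - 1 from by omega]
    rw [show i + k - 1 - (k - 1) = i from by omega]
    exact max_self _
  · have hr1 : 1 ≤ i % k := by omega
    have h1 : (i + k - 1) % k = i % k - 1 := by
      rw [hwe]
      rw [show i % k + k - 1 = k + (i % k - 1) from by omega, Nat.add_mod_left]
      exact Nat.mod_eq_of_lt (by omega)
    rw [hsuf, hpre, h1]
    rw [show min (i - i % k + (k - 1)) (n + k - 1 - 1) - i = k - 1 - i % k from by omega]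
    rw [show i + k - 1 - (i % k - 1) = i + (k - 1 - i % k) + 1 from by omega]
    conv_rhs => rw [show k - 1 = (k - 1 - i % k) + (i % k - 1) + 1 from by omega]
    rw [qQ_split]

-- ===== A-side =====

lemma A_inner (A : List Int) (i : ℕ) (mv : Int) (t : ℕ) :
    (PySem.List.pyRange 0 ((t : ℕ) : Int) 1).foldl
      (fun (st : Int × Int) k =>
        (st.1 + PySem.List.pyGetD A (PySem.Int.mod ((i : Int) + k) ((A.length : ℕ) : ℤ)) 0,
          max st.2 (st.1 + PySem.List.pyGetD A (PySem.Int.mod ((i : Int) + k) ((A.length : ℕ) : ℤ)) 0)))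
      ((0 : Int), mv)
    = (Pf A (i+t) - Pf A i, if t = 0 then mv else max mv (qQ A i (t-1) - Pf A i)) := by
  induction t with
  | zero =>
    rw [Nat.cast_zero, PySem.List.pyRange_one_eq_nil le_rfl]
    simp
  | succ t ih =>
    rw [show ((t+1 : ℕ) : ℤ) = (t : ℤ) + 1 from by push_cast; ring,
      PySem.List.pyRange_one_succ_right (Int.natCast_nonneg t), List.foldl_append, ih,
      List.foldl_cons, List.foldl_nil]
    dsimp only
    rw [show (i : ℤ) + (t : ℤ) = ((i + t : ℕ) : ℤ) from by push_cast; ring,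
      PySem.Int.mod_natCast, PySem.List.pyGetD_natCast]
    have hstep : Pf A (i+t) - Pf A i + A.getD ((i+t) % A.length) 0 = Pf A (i+(t+1)) - Pf A i := by
      rw [show i+(t+1) = (i+t)+1 from by omega]
      show _ = Pf A (i+t) + Ef A (i+t) - Pf A i
      rw [Ef]; ring
    rw [hstep]
    simp only [Prod.mk.injEq, true_and]
    cases t with
    | zero => simp [qQ, Qf]
    | succ s =>
      simp only [Nat.succ_ne_zero, if_false, Nat.add_sub_cancel]
      rw [max_assoc]
      congr 1
      rw [show Pf A (i+(s+1+1)) = Qf A (i+s+1) from by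
        rw [Qf, show i+s+1+1 = i+(s+1+1) from by omega]]
      rw [max_sub_sub_right]
      rfl

lemma A_eq (A : List Int) {K : Int} (hK : 0 < K) :
    circle_maximum A K =
      (List.range A.length).foldl
        (fun mv i => max mv (qQ A i (K.toNat - 1) - Pf A i))
        ((PySem.List.max? A id).getD 0) := by
  have hKk : K = ((K.toNat : ℕ) : ℤ) := by omega
  simp only [circle_maximum, PySem.List.len_eq]
  rw [PySem.List.pyRange_zero_nat, List.foldl_map, hKk]
  simp only [Int.toNat_natCast]
  apply PySem.List.foldl_congr_mem
  intro acc i _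
  dsimp only
  rw [A_inner A i acc K.toNat, if_neg (by omega : ¬ K.toNat = 0)]

-- ===== B-side =====

lemma P_list (A : List Int) (t : ℕ) :
    (PySem.List.pyRange 0 ((t : ℕ) : ℤ) 1).foldl
      (fun P j => P ++ [PySem.List.pyGetD P (-1) 0
        + PySem.List.pyGetD A (PySem.Int.mod j ((A.length : ℕ) : ℤ)) 0])
      [(0 : Int)]
    = (List.range (t+1)).map (Pf A) := by
  induction t with
  | zero =>
    rw [Nat.cast_zero, PySem.List.pyRange_one_eq_nil le_rfl]
    simp [Pf]
  | succ t ih =>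
    rw [show ((t+1 : ℕ) : ℤ) = (t : ℤ) + 1 from by push_cast; ring,
      PySem.List.pyRange_one_succ_right (Int.natCast_nonneg t), List.foldl_append, ih,
      List.foldl_cons, List.foldl_nil]
    rw [PySem.Int.mod_natCast, PySem.List.pyGetD_natCast]
    have hlast : PySem.List.pyGetD ((List.range (t+1)).map (Pf A)) (-1) 0 = Pf A t := by
      rw [List.range_succ, List.map_append, List.map_cons, List.map_nil,
        PySem.List.pyGetD_neg_one_append_singleton]
    rw [hlast]
    conv_rhs => rw [List.range_succ, List.map_append, List.map_cons, List.map_nil]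
    rfl

lemma pre_list (A : List Int) {k m : ℕ} (_hk : 0 < k) (hm : m + 1 ≤ A.length + k) :
    ∀ t, t ≤ m →
    (PySem.List.pyRange 0 ((t : ℕ) : ℤ) 1).foldl
      (fun pre tt => pre ++ [if PySem.Int.mod tt ((k : ℕ) : ℤ) = 0
          then PySem.List.pyGetD ((List.range (A.length + k)).map (Pf A)) (tt + 1) 0
          else max (PySem.List.pyGetD pre (-1) 0)
            (PySem.List.pyGetD ((List.range (A.length + k)).map (Pf A)) (tt + 1) 0)])
      []
    = (List.range t).map (preF A k) := by
  intro t
  induction t with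
  | zero =>
    intro _
    rw [Nat.cast_zero, PySem.List.pyRange_one_eq_nil le_rfl]
    simp
  | succ t ih =>
    intro ht
    rw [show ((t+1 : ℕ) : ℤ) = (t : ℤ) + 1 from by push_cast; ring,
      PySem.List.pyRange_one_succ_right (Int.natCast_nonneg t), List.foldl_append,
      ih (by omega), List.foldl_cons, List.foldl_nil]
    rw [show (t : ℤ) + 1 = ((t+1 : ℕ) : ℤ) from by push_cast; ring,
      PySem.Int.mod_natCast, PySem.List.pyGetD_natCast,
      PySem.List.getD_map_range _ _ _ _ (by omega : t + 1 < A.length + k)]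
    simp only [Nat.cast_eq_zero]
    by_cases h0 : t % k = 0
    · have hv : Pf A (t+1) = preF A k t := by
        cases t with
        | zero => rfl
        | succ s =>
          rw [show preF A k (s+1)
              = if (s+1) % k = 0 then Qf A (s+1) else max (preF A k s) (Qf A (s+1)) from rfl,
            if_pos h0]
          rfl
      rw [if_pos h0, hv]
      conv_rhs => rw [List.range_succ, List.map_append, List.map_cons, List.map_nil]
    · rw [if_neg h0]
      cases t with
      | zero => exact absurd (Nat.zero_mod k) h0
      | succ s =>
        have hlast : PySem.List.pyGetD ((List.range (s+1)).map (preF A k)) (-1) 0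
            = preF A k s := by
          rw [List.range_succ, List.map_append, List.map_cons, List.map_nil,
            PySem.List.pyGetD_neg_one_append_singleton]
        rw [hlast]
        have hv : max (preF A k s) (Pf A (s+1+1)) = preF A k (s+1) := by
          rw [show preF A k (s+1)
              = if (s+1) % k = 0 then Qf A (s+1) else max (preF A k s) (Qf A (s+1)) from rfl,
            if_neg h0]
          rfl
        rw [hv]
        conv_rhs => rw [List.range_succ, List.map_append, List.map_cons, List.map_nil]

lemma suf_list (A : List Int) {k m : ℕ} (hk : 0 < k) (hmn : m + 1 ≤ A.length + k) :
    ∀ (j : ℕ), j < m → ∀ (acc : List Int),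
      acc = (List.range (m - 1 - j)).map (fun s => sufF A k m (m - 1 - s)) →
      (PySem.List.pyRange ((j : ℕ) : ℤ) (-1) (-1)).foldl
        (fun s tt =>
          if PySem.Int.mod tt ((k : ℕ) : ℤ) = ((k : ℕ) : ℤ) - 1 ∨ tt = ((m - 1 : ℕ) : ℤ)
          then s ++ [PySem.List.pyGetD ((List.range (A.length + k)).map (Pf A)) (tt + 1) 0]
          else s ++ [max (PySem.List.pyGetD s (-1) 0)
            (PySem.List.pyGetD ((List.range (A.length + k)).map (Pf A)) (tt + 1) 0)])
        acc
      = (List.range m).map (fun s => sufF A k m (m - 1 - s)) := by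
  intro j
  induction j with
  | zero =>
    intro hj acc hacc
    rw [PySem.List.pyRange_neg_one_cons (by omega : (-1 : ℤ) < ((0 : ℕ) : ℤ)),
      show ((0 : ℕ) : ℤ) - 1 = -1 from by omega,
      PySem.List.pyRange_neg_one_eq_nil le_rfl, List.foldl_cons, List.foldl_nil]
    have hcond : (PySem.Int.mod ((0 : ℕ) : ℤ) ((k : ℕ) : ℤ) = ((k : ℕ) : ℤ) - 1
        ∨ ((0 : ℕ) : ℤ) = ((m - 1 : ℕ) : ℤ)) ↔ (0 % k = k - 1 ∨ m - 1 ≤ 0) := by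
      rw [PySem.Int.mod_natCast]
      omega
    have hsuf0 : sufF A k m 0
        = if 0 % k = k - 1 ∨ m - 1 ≤ 0 then Qf A 0
          else max (sufF A k m 1) (Qf A 0) := by rw [sufF]
    rw [show ((0 : ℕ) : ℤ) + 1 = ((0 + 1 : ℕ) : ℤ) from by omega,
      PySem.List.pyGetD_natCast,
      PySem.List.getD_map_range _ _ _ _ (by omega : 0 + 1 < A.length + k)]
    by_cases hc : 0 % k = k - 1 ∨ m - 1 ≤ 0
    · have hv : Pf A (0+1) = sufF A k m 0 := by rw [hsuf0, if_pos hc]; rfl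
      rw [if_pos (hcond.mpr hc), hacc, hv, show m - 1 - 0 = m - 1 from by omega]
      conv_rhs => rw [show List.range m = List.range ((m-1)+1) from by
        rw [show (m-1)+1 = m from by omega]]
      conv_rhs => rw [List.range_succ, List.map_append, List.map_cons, List.map_nil]
      simp
    · have hm2 : 2 ≤ m := by omega
      have hlast : PySem.List.pyGetD
          ((List.range ((m-2)+1)).map (fun s => sufF A k m (m - 1 - s))) (-1) 0
          = sufF A k m 1 := by
        rw [List.range_succ, List.map_append, List.map_cons, List.map_nil,
          PySem.List.pyGetD_neg_one_append_singleton]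
        show sufF A k m (m - 1 - (m - 2)) = _
        rw [show m - 1 - (m - 2) = 1 from by omega]
      rw [if_neg ((not_congr hcond).mpr hc), hacc,
        show m - 1 - 0 = (m-2)+1 from by omega, hlast]
      have hv : max (sufF A k m 1) (Pf A (0+1)) = sufF A k m 0 := by
        rw [hsuf0, if_neg hc]; rfl
      rw [hv]
      conv_rhs => rw [show List.range m = List.range (((m-2)+1)+1) from by
        rw [show ((m-2)+1)+1 = m from by omega]]
      conv_rhs => rw [List.range_succ, List.map_append, List.map_cons, List.map_nil]
      simp [show m - 1 - ((m-2)+1) = 0 from by omega]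
  | succ j ih =>
    intro hj acc hacc
    rw [PySem.List.pyRange_neg_one_cons (by omega : (-1 : ℤ) < ((j + 1 : ℕ) : ℤ)),
      show ((j + 1 : ℕ) : ℤ) - 1 = ((j : ℕ) : ℤ) from by push_cast; ring,
      List.foldl_cons]
    apply ih (by omega)
    dsimp only
    have hcond : (PySem.Int.mod ((j + 1 : ℕ) : ℤ) ((k : ℕ) : ℤ) = ((k : ℕ) : ℤ) - 1
        ∨ ((j + 1 : ℕ) : ℤ) = ((m - 1 : ℕ) : ℤ)) ↔ ((j+1) % k = k - 1 ∨ m - 1 ≤ j + 1) := by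
      rw [PySem.Int.mod_natCast]
      omega
    have hsufj : sufF A k m (j+1)
        = if (j+1) % k = k - 1 ∨ m - 1 ≤ j + 1 then Qf A (j+1)
          else max (sufF A k m (j+1+1)) (Qf A (j+1)) := by rw [sufF]
    rw [show ((j + 1 : ℕ) : ℤ) + 1 = ((j + 2 : ℕ) : ℤ) from by push_cast; ring,
      PySem.List.pyGetD_natCast,
      PySem.List.getD_map_range _ _ _ _ (by omega : j + 2 < A.length + k)]
    by_cases hc : (j+1) % k = k - 1 ∨ m - 1 ≤ j + 1
    · have hv : Pf A (j+2) = sufF A k m (j+1) := by rw [hsufj, if_pos hc]; rfl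
      rw [if_pos (hcond.mpr hc), hacc, hv,
        show m - 1 - j = (m - 1 - (j+1)) + 1 from by omega]
      conv_rhs => rw [List.range_succ, List.map_append, List.map_cons, List.map_nil]
      simp [show m - 1 - (m - 1 - (j+1)) = j + 1 from by omega]
    · have hj2 : j + 2 ≤ m - 1 := by omega
      have hlast : PySem.List.pyGetD
          ((List.range ((m-3-j)+1)).map (fun s => sufF A k m (m - 1 - s))) (-1) 0
          = sufF A k m (j+2) := by
        rw [List.range_succ, List.map_append, List.map_cons, List.map_nil,
          PySem.List.pyGetD_neg_one_append_singleton]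
        show sufF A k m (m - 1 - (m - 3 - j)) = _
        rw [show m - 1 - (m - 3 - j) = j + 2 from by omega]
      rw [if_neg ((not_congr hcond).mpr hc), hacc,
        show m - 1 - (j+1) = (m-3-j)+1 from by omega, hlast]
      have hv : max (sufF A k m (j+2)) (Pf A (j+2)) = sufF A k m (j+1) := by
        rw [hsufj, if_neg hc]; rfl
      rw [hv, show m - 1 - j = ((m-3-j)+1)+1 from by omega]
      conv_rhs => rw [List.range_succ, List.map_append, List.map_cons, List.map_nil]
      simp [show m - 1 - ((m-3-j)+1) = j + 1 from by omega]

lemma rev_map_range {f : ℕ → Int} (m : ℕ) :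
    ((List.range m).map (fun s => f (m - 1 - s))).reverse = (List.range m).map f := by
  apply List.ext_getElem
  · simp
  · intro i h1 h2
    simp only [List.length_reverse, List.length_map, List.length_range] at h1 h2
    simp only [List.getElem_reverse, List.getElem_map, List.getElem_range, List.length_map,
      List.length_range]
    congr 1
    omega

lemma B_eq (A : List Int) (hn : A ≠ []) {K : Int} (hK : 0 < K) :
    circle_maximum_alt A K =
      (List.range A.length).foldl
        (fun mv i => max mv (max (sufF A K.toNat (A.length + K.toNat - 1) i)
          (preF A K.toNat (i + K.toNat - 1)) - Pf A i))
        ((PySem.List.max? A id).getD 0) := by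
  have hn0 : 0 < A.length := by
    cases A with
    | nil => cases hn rfl
    | cons a t => simp
  have hKk : K = ((K.toNat : ℕ) : ℤ) := by omega
  have hk0 : 0 < K.toNat := by omega
  simp only [circle_maximum_alt, PySem.List.len_eq]
  rw [if_neg (by omega : ¬ K ≤ 0), hKk]
  simp only [Int.toNat_natCast]
  rw [show (A.length : ℤ) + ((K.toNat : ℕ) : ℤ) - 1 = ((A.length + K.toNat - 1 : ℕ) : ℤ) from by omega]
  rw [P_list A (A.length + K.toNat - 1),
    show A.length + K.toNat - 1 + 1 = A.length + K.toNat from by omega,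
    pre_list A hk0 (by omega) (A.length + K.toNat - 1) le_rfl,
    show ((A.length + K.toNat - 1 : ℕ) : ℤ) - 1 = ((A.length + K.toNat - 1 - 1 : ℕ) : ℤ) from by omega,
    suf_list A hk0 (by omega) (A.length + K.toNat - 1 - 1) (by omega) []
      (by rw [show A.length + K.toNat - 1 - 1 - (A.length + K.toNat - 1 - 1) = 0 from by omega]; rfl),
    PySem.List.slice?_none_none_neg_one, Option.getD_some, rev_map_range,
    PySem.List.pyRange_zero_nat, List.foldl_map]
  apply PySem.List.foldl_congr_mem
  intro acc i hi
  have hin : i < A.length := List.mem_range.mp hi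
  rw [show (i : ℤ) + ((K.toNat : ℕ) : ℤ) - 1 = ((i + K.toNat - 1 : ℕ) : ℤ) from by omega]
  simp only [PySem.List.pyGetD_natCast]
  rw [PySem.List.getD_map_range _ _ _ _ (by omega : i < A.length + K.toNat - 1),
    PySem.List.getD_map_range _ _ _ _ (by omega : i + K.toNat - 1 < A.length + K.toNat - 1),
    PySem.List.getD_map_range _ _ _ _ (by omega : i < A.length + K.toNat)]

-- ===== VERDICT (by name: the statement is the Claim_ definition above) =====
theorem circle_maximum_spec : Claim_equal_circle_maximum := by
  intro A K _hDom hPre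
  unfold Spec_circle_maximum
  by_cases hK : K ≤ 0
  · simp [circle_maximum, circle_maximum_alt, hK, PySem.List.pyRange_one_eq_nil hK,
      List.foldl_fixed]
  · rw [not_le] at hK
    rw [A_eq A hK, B_eq A hPre hK]
    apply PySem.List.foldl_congr_mem
    intro acc i hi
    rw [window_eq A (n := A.length) (by omega) i (List.mem_range.mp hi)]
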